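-- pv_equiv track=rewrite | github.com/KeKoParis/AOIS_lab2 | main.py | build_pcnf
-- ===== SOURCE A (Python) =====
-- def find_values_pcnf(curr_row):  # make pcnf form out of table
--     new_expression: str = ""
--     number = 1
--     for i in curr_row:
--         if number == 4:
--             break
--         if i == 0:
--             new_expression += "x" + str(number)
--         else:
--             new_expression += "!x" + str(number)
--         number += 1
--         if number < 4:
--             new_expression += " + "
--
--     return new_expression
--
-- def conv_bin(expr):
--     bin_exp = ""
--     c = 0
--     for i in range(len(expr)):
--         if c == 1:
--             c = 0
--             continue
--         if expr[i] == "!":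
--             c = 1
--             bin_exp += "1"
--         if expr[i] == "x":
--             bin_exp += "0"
--     return bin_exp
--
-- def conv_dec(curr_row):
--     dec = 0
--     for i in range(len(curr_row)):
--         dec += int(curr_row[i]) * (2 ** (3 - i - 1))
--
--     return str(int(dec))
--
-- def build_pcnf(curr_table):
--     pcnf: str = ""
--     bin_pcnf = ""
--     dec_pcnf = ""
--     for row in curr_table:
--         if row[3] == 0:
--             pcnf += "("
--             pcnf += find_values_pcnf(row)
--             pcnf += ")*"
--             bin_pcnf += conv_bin(find_values_pcnf(row))
--             bin_pcnf += " "
--             dec_pcnf += conv_dec(row) + " "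
--
--     return pcnf, bin_pcnf, dec_pcnf
-- ===== SOURCE B (Python) =====
-- def literal(i, v):
--     return ("x" if v == 0 else "!x") + str(i)
--
--
-- def build_pcnf(curr_table):
--     pcnf = ""
--     bin_pcnf = ""
--     dec_pcnf = ""
--     for row in curr_table:
--         a, b, c, r = row
--         if r != 0:
--             continue
--         pcnf += "(" + " + ".join([literal(1, a), literal(2, b), literal(3, c)]) + ")*"
--         bin_pcnf += "".join("0" if v == 0 else "1" for v in (a, b, c)) + " "
--         dec_pcnf += str(4 * a + 2 * b + c) + " "
--     return pcnf, bin_pcnf, dec_pcnf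
-- ===== Notes on version B (the rewrite author's own statement) =====
-- stated objective: simpler
-- what changed: B unpacks each 4-entry truth-table row and builds the clause, the bit string and the decimal directly from the three variable values (join over literals, per-value bits, the weighted sum 4a+2b+c) instead of generating a PCNF sub-expression string and re-parsing it character by character and summing float powers; Pre_ restricts to tables whose rows have exactly 4 entries (a 3-variable truth table): on shorter rows A raises IndexError, and on longer rows B's row unpacking raises ValueError while A returns a value shaped by float truncation of the entries past the third.
-- outside the precondition, e.g. on build_pcnf([[0, 1, 0, 0, 1]]): A returns ('(x1 + !x2 + x3)*', '010 ', '2 '), B raises ValueError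
import Mathlib
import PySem

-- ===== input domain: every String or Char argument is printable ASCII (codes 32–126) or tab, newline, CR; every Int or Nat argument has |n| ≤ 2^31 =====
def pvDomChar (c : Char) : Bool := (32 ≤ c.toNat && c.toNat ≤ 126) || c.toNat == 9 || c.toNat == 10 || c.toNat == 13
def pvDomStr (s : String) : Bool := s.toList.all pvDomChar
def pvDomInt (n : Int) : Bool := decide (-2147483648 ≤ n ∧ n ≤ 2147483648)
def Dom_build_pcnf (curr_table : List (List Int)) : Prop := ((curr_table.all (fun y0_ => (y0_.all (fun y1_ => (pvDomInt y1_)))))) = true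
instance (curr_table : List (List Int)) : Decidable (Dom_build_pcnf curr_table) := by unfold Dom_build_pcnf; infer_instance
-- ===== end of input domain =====

-- B builds clause, bit string and decimal directly from the three unpacked row values
-- (join over literals, per-value bits, the weighted sum 4a+2b+c) instead of generating a
-- PCNF sub-expression string and re-parsing it, and summing float powers. (simpler)

-- ===== PORT A =====
-- find_values_pcnf: loop over the row with counter `number`, break at 4
def pvFvpGo : List Int → Int → List Char → List Char
  | [], _, acc => acc
  | i :: rest, number, acc =>
    if number = 4 then acc
    else
      let acc := acc ++ (if i = 0 then 'x' :: PySem.Int.toChars number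
                         else '!' :: 'x' :: PySem.Int.toChars number)
      let number := number + 1
      let acc := if number < 4 then acc ++ [' ', '+', ' '] else acc
      pvFvpGo rest number acc

def pvFindValuesPcnf (curr_row : List Int) : List Char := pvFvpGo curr_row 1 []

-- conv_bin: scan the expression characters with the skip flag c
def pvConvBinGo : List Char → Int → List Char → List Char
  | [], _, acc => acc
  | ch :: rest, c, acc =>
    if c = 1 then pvConvBinGo rest 0 acc
    else
      let p := if ch = '!' then ((1 : Int), acc ++ ['1']) else (c, acc)
      let acc2 := if ch = 'x' then p.2 ++ ['0'] else p.2
      pvConvBinGo rest p.1 acc2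

def pvConvBin (expr : List Char) : List Char := pvConvBinGo expr 0 []

-- conv_dec: Python sums curr_row[i] * 2**(3-i-1), float arithmetic from i = 3 on.
-- Ported exactly as the scaled integer N / 2^k (k = max(len-3,0), Nat subtraction) with
-- int()'s truncation toward zero = Int.tdiv; exact wherever the Python floats round
-- nothing away (true on the lengths and magnitudes Pre_ admits).
def pvConvDec (curr_row : List Int) : List Char :=
  let n := curr_row.length
  let k := n - 3
  let N := (List.range n).foldl (fun acc i => acc + curr_row.getD i 0 * (2 : Int) ^ (2 + k - i)) 0
  PySem.Int.toChars (Int.tdiv N ((2 : Int) ^ k))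

def build_pcnf (curr_table : List (List Int)) : String × String × String :=
  let res := curr_table.foldl
    (fun (acc : List Char × List Char × List Char) row =>
      if PySem.List.pyGetD row 3 0 = 0 then
        (acc.1 ++ '(' :: (pvFindValuesPcnf row ++ [')', '*']),
         acc.2.1 ++ pvConvBin (pvFindValuesPcnf row) ++ [' '],
         acc.2.2 ++ pvConvDec row ++ [' '])
      else acc)
    ([], [], [])
  (String.ofList res.1, String.ofList res.2.1, String.ofList res.2.2)

-- ===== PORT B =====
def pvLiteral (i : Int) (v : Int) : List Char :=
  (if v = 0 then ['x'] else ['!', 'x']) ++ PySem.Int.toChars i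

-- the unpack `a, b, c, r = row` raises on rows of length ≠ 4: those inputs are outside
-- Pre_, the port returns the running accumulator unchanged there
def build_pcnf_alt (curr_table : List (List Int)) : String × String × String :=
  let res := curr_table.foldl
    (fun (acc : List Char × List Char × List Char) row =>
      match row with
      | [a, b, c, r] =>
        if r ≠ 0 then acc
        else
          (acc.1 ++ '(' :: (List.intercalate [' ', '+', ' ']
                              [pvLiteral 1 a, pvLiteral 2 b, pvLiteral 3 c] ++ [')', '*']),
           acc.2.1 ++ ([a, b, c].map (fun v => if v = 0 then '0' else '1')) ++ [' '],
           acc.2.2 ++ PySem.Int.toChars (4 * a + 2 * b + c) ++ [' '])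
      | _ => acc)
    ([], [], [])
  (String.ofList res.1, String.ofList res.2.1, String.ofList res.2.2)

-- ===== PRECONDITION & SPEC =====
-- Pre_ restricts to 3-variable truth tables: every row has exactly 4 entries. On shorter
-- rows A raises IndexError at row[3]; on longer rows A returns a value shaped by float
-- truncation of the entries past the third while B's row unpacking raises ValueError.
def Pre_build_pcnf (curr_table : List (List Int)) : Prop :=
  ∀ row ∈ curr_table, row.length = 4
instance (curr_table : List (List Int)) : Decidable (Pre_build_pcnf curr_table) := by
  unfold Pre_build_pcnf; infer_instance

def pvWitness_build_pcnf : List (List Int) := [[0, 1, 0, 0], [1, 1, 1, 1]]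

def Spec_build_pcnf (curr_table : List (List Int)) (out : String × String × String) : Prop :=
  out = build_pcnf_alt curr_table
instance (curr_table : List (List Int)) (out : String × String × String) :
    Decidable (Spec_build_pcnf curr_table out) := by unfold Spec_build_pcnf; infer_instance

-- ===== CLAIM (what is proved, stated in full; the proofs are below) =====
def Claim_equal_build_pcnf : Prop :=
  ∀ (curr_table : List (List Int)), Dom_build_pcnf curr_table → Pre_build_pcnf curr_table →
    Spec_build_pcnf curr_table (build_pcnf curr_table)

-- ===== LEMMAS AND PROOFS =====

-- per-row equality of the clause strings
lemma pv_row_pcnf (a b c r : Int) :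
    pvFindValuesPcnf [a, b, c, r]
      = List.intercalate [' ', '+', ' '] [pvLiteral 1 a, pvLiteral 2 b, pvLiteral 3 c] := by
  by_cases ha : a = 0 <;> by_cases hb : b = 0 <;> by_cases hc : c = 0 <;>
    simp [pvFindValuesPcnf, pvFvpGo, pvLiteral, ha, hb, hc,
      List.intercalate, PySem.Int.toChars]

-- per-row equality of the binary strings
lemma pv_row_bin (a b c r : Int) :
    pvConvBin (pvFindValuesPcnf [a, b, c, r])
      = [a, b, c].map (fun v => if v = 0 then '0' else '1') := by
  by_cases ha : a = 0 <;> by_cases hb : b = 0 <;> by_cases hc : c = 0 <;>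
    simp [pvFindValuesPcnf, pvFvpGo, pvConvBin, pvConvBinGo, ha, hb, hc,
      PySem.Int.toChars] <;> decide

-- per-row equality of the decimal strings (row[3] = 0, so the scaled sum is even)
lemma pv_row_dec (a b c : Int) :
    pvConvDec [a, b, c, 0] = PySem.Int.toChars (4 * a + 2 * b + c) := by
  show PySem.Int.toChars (Int.tdiv ((List.range 4).foldl
      (fun acc i => acc + [a, b, c, 0].getD i 0 * (2 : Int) ^ (2 + 1 - i)) 0) ((2 : Int) ^ (1 : Nat)))
    = PySem.Int.toChars (4 * a + 2 * b + c)
  have h : (List.range 4).foldl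
      (fun acc i => acc + [a, b, c, 0].getD i 0 * (2 : Int) ^ (2 + 1 - i)) 0
      = 2 * (4 * a + 2 * b + c) := by
    simp [List.range_succ]; ring
  rw [h, pow_one, Int.mul_tdiv_cancel_left _ (by norm_num : (2 : Int) ≠ 0)]

-- the two loop bodies agree on a 4-entry row
lemma pv_step_eq (acc : List Char × List Char × List Char) (a b c r : Int) :
    (if PySem.List.pyGetD [a, b, c, r] 3 0 = 0 then
       (acc.1 ++ '(' :: (pvFindValuesPcnf [a, b, c, r] ++ [')', '*']),
        acc.2.1 ++ pvConvBin (pvFindValuesPcnf [a, b, c, r]) ++ [' '],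
        acc.2.2 ++ pvConvDec [a, b, c, r] ++ [' '])
     else acc)
    = (if r ≠ 0 then acc
       else
        (acc.1 ++ '(' :: (List.intercalate [' ', '+', ' ']
                            [pvLiteral 1 a, pvLiteral 2 b, pvLiteral 3 c] ++ [')', '*']),
         acc.2.1 ++ ([a, b, c].map (fun v => if v = 0 then '0' else '1')) ++ [' '],
         acc.2.2 ++ PySem.Int.toChars (4 * a + 2 * b + c) ++ [' '])) := by
  have hget : PySem.List.pyGetD [a, b, c, r] 3 0 = r := by simp [pysem]
  rw [hget]
  by_cases hr : r = 0
  · subst hr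
    rw [if_pos rfl, if_neg (by simp), pv_row_bin, pv_row_pcnf, pv_row_dec]
  · rw [if_neg hr, if_pos hr]

-- fold equality over a table of 4-entry rows
lemma pv_fold_eq (t : List (List Int)) (acc : List Char × List Char × List Char)
    (h : ∀ row ∈ t, row.length = 4) :
    t.foldl
      (fun (acc : List Char × List Char × List Char) row =>
        if PySem.List.pyGetD row 3 0 = 0 then
          (acc.1 ++ '(' :: (pvFindValuesPcnf row ++ [')', '*']),
           acc.2.1 ++ pvConvBin (pvFindValuesPcnf row) ++ [' '],
           acc.2.2 ++ pvConvDec row ++ [' '])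
        else acc) acc
    = t.foldl
      (fun (acc : List Char × List Char × List Char) row =>
        match row with
        | [a, b, c, r] =>
          if r ≠ 0 then acc
          else
            (acc.1 ++ '(' :: (List.intercalate [' ', '+', ' ']
                                [pvLiteral 1 a, pvLiteral 2 b, pvLiteral 3 c] ++ [')', '*']),
             acc.2.1 ++ ([a, b, c].map (fun v => if v = 0 then '0' else '1')) ++ [' '],
             acc.2.2 ++ PySem.Int.toChars (4 * a + 2 * b + c) ++ [' '])
        | _ => acc) acc := by
  induction t generalizing acc with
  | nil => rfl
  | cons row rest ih =>
    have h4 : row.length = 4 := h row (by simp)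
    obtain ⟨a, ⟨b, ⟨c, ⟨r, rfl⟩⟩⟩⟩ :
        ∃ a b c r : Int, row = [a, b, c, r] := by
      match row, h4 with
      | [a, b, c, r], _ => exact ⟨a, b, c, r, rfl⟩
    simp only [List.foldl_cons]
    rw [pv_step_eq acc a b c r]
    exact ih _ (fun q hq => h q (by simp [hq]))

-- ===== VERDICT (by name: the statement is the Claim_ definition above) =====
theorem build_pcnf_spec : Claim_equal_build_pcnf := by
  intro curr_table _ hpre
  unfold Spec_build_pcnf build_pcnf build_pcnf_alt
  rw [pv_fold_eq curr_table ([], [], []) hpre]
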